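-- pv_equiv track=rewrite | github.com/AlexGPlay/Puzzles | advent of code/adventofcode.com/2023/20/challenge20.py | get_cycle_if_exists
-- ===== SOURCE A (Python) =====
-- def get_cycle_if_exists(cycle):
--     true_index = -1
--
--     for i in range(len(cycle)):
--         elem = cycle[i]
--         if elem:
--             if true_index != -1 and i - true_index > 1:
--                 return i - true_index
--
--             true_index = i
--
--     return -1
-- ===== SOURCE B (Python) =====
-- def get_cycle_if_exists(cycle):
--     # Run-length encode the sequence of truthiness values.
--     runs = []
--     cur = None  # current run: (value, length)
--     for e in cycle:
--         b = bool(e)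
--         if cur is not None and cur[0] == b:
--             cur = (b, cur[1] + 1)
--         else:
--             if cur is not None:
--                 runs.append(cur)
--             cur = (b, 1)
--     if cur is not None:
--         runs.append(cur)
--     # Drop a leading falsy run: a gap needs a truthy element before it.
--     if runs and not runs[0][0]:
--         runs = runs[1:]
--     # The first falsy run followed by a truthy run is the first gap; its size is length + 1.
--     for (k1, n1), (k2, n2) in zip(runs, runs[1:]):
--         if k2:
--             return n1 + 1
--     return -1
-- ===== Notes on version B (the rewrite author's own statement) =====
-- stated objective: alternative
-- what changed: Replaces A's index tracking with run-length encoding: B compresses the list into runs of equal truthiness, drops a leading falsy run, and returns length+1 of the first falsy run followed by a truthy run; it never computes indices at all.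
import Mathlib
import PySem

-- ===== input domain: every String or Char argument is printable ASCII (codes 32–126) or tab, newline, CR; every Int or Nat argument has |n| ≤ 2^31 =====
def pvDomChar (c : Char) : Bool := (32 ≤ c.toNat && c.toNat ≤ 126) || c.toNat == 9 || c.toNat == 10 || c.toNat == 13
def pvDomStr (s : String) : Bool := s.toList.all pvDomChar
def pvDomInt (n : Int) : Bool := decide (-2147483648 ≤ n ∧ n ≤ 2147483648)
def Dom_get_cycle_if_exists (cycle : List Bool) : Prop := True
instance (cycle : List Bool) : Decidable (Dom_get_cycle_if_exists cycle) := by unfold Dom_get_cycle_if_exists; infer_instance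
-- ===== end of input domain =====

-- B replaces A's last-truthy-index tracking with a run-length encoding: it compresses
-- the list into runs of equal truthiness and returns length+1 of the first falsy run
-- sitting between truthy runs (alternative decomposition; same cost).

-- ===== PORT A =====
-- the 'for i in range(len(cycle))' loop with early return and state true_index
def pvALoop (cycle : List Bool) (i : Nat) (trueIndex : Int) : Int :=
  if h : i < cycle.length then
    let elem := cycle[i]
    if elem then
      if trueIndex ≠ -1 ∧ (i : Int) - trueIndex > 1 then (i : Int) - trueIndex
      else pvALoop cycle (i + 1) (i : Int)
    else pvALoop cycle (i + 1) trueIndex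
  else -1
termination_by cycle.length - i

def get_cycle_if_exists (cycle : List Bool) : Int :=
  pvALoop cycle 0 (-1)

-- ===== PORT B =====
-- Source B's run-length-encoding loop: 'cur' is the current run (value b, count n);
-- on an equal element the count grows, otherwise the run is emitted and a new one starts.
def pvRun (b : Bool) (n : Int) : List Bool → List (Bool × Int)
  | [] => [(b, n)]
  | c :: rest => if c = b then pvRun b (n + 1) rest else (b, n) :: pvRun c 1 rest

def pvRLE : List Bool → List (Bool × Int)
  | [] => []
  | b :: rest => pvRun b 1 rest

-- the 'for (k1, n1), (k2, n2) in zip(runs, runs[1:])' loop with early return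
def pvScan : List (Bool × Int) → Int
  | (_, n1) :: (k2, n2) :: t => if k2 then n1 + 1 else pvScan ((k2, n2) :: t)
  | _ => -1

def get_cycle_if_exists_alt (cycle : List Bool) : Int :=
  let runs := pvRLE cycle
  -- 'if runs and not runs[0][0]: runs = runs[1:]'
  let runs2 := match runs with
    | (false, _) :: t => t
    | r => r
  pvScan runs2

-- ===== PRECONDITION & SPEC =====
def Spec_get_cycle_if_exists (cycle : List Bool) (out : Int) : Prop := out = get_cycle_if_exists_alt cycle
instance (cycle : List Bool) (out : Int) : Decidable (Spec_get_cycle_if_exists cycle out) := by unfold Spec_get_cycle_if_exists; infer_instance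

-- ===== CLAIM (what is proved, stated in full; the proofs are below) =====
def Claim_equal_get_cycle_if_exists : Prop := ∀ (cycle : List Bool), Dom_get_cycle_if_exists cycle → Spec_get_cycle_if_exists cycle (get_cycle_if_exists cycle)

-- ===== LEMMAS AND PROOFS =====

-- Common spec: F l = first gap > 1 between consecutive truthy elements, no truthy seen yet;
-- G l g = the same with a truthy seen g positions before the head of l.
mutual
def pvF : List Bool → Int
  | [] => -1
  | false :: r => pvF r
  | true :: r => pvG r 1
def pvG : List Bool → Int → Int
  | [], _ => -1
  | true :: r, g => if g > 1 then g else pvG r 1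
  | false :: r, g => pvG r (g + 1)
end

-- ---- A side: pvALoop computes pvF / pvG ----
theorem pvALoop_eq (cycle : List Bool) (i : Nat) (t : Int) (ht : t = -1 ∨ (0 ≤ t ∧ t < i)) :
    pvALoop cycle i t =
      if t = -1 then pvF (cycle.drop i)
      else pvG (cycle.drop i) ((i : Int) - t) := by
  by_cases h : i < cycle.length
  · have hdrop : cycle.drop i = cycle[i] :: cycle.drop (i + 1) :=
      List.drop_eq_getElem_cons h
    by_cases he : cycle[i] = true
    · by_cases htt : t = -1
      · rw [pvALoop]
        simp only [h, dif_pos, he, if_pos, htt]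
        have hi : ((i : Int)) ≠ -1 := by omega
        rw [pvALoop_eq cycle (i + 1) (i : Int) (Or.inr ⟨by omega, by omega⟩)]
        simp [hi, hdrop, he, pvF]
      · rw [pvALoop]
        simp only [h, dif_pos, he, if_pos]
        rw [hdrop]
        simp only [htt]
        by_cases hc : (i : Int) - t > 1
        · simp [htt, hc, he, pvG]
        · have hi : ((i : Int)) ≠ -1 := by omega
          rw [pvALoop_eq cycle (i + 1) (i : Int) (Or.inr ⟨by omega, by omega⟩)]
          simp [htt, hc, hi, he, pvG]
    · rw [pvALoop]
      simp only [h, dif_pos, he]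
      have he' : cycle[i] = false := by simpa using he
      have ht' : t = -1 ∨ (0 ≤ t ∧ t < (i + 1 : Nat)) := by
        rcases ht with h1 | h2
        · exact Or.inl h1
        · exact Or.inr ⟨h2.1, by push_cast; omega⟩
      rw [pvALoop_eq cycle (i + 1) t ht', hdrop]
      by_cases htt : t = -1
      · simp [htt, he', pvF]
      · simp [htt, he', pvG]
        congr 1
        ring
  · have hdrop : cycle.drop i = [] := List.drop_eq_nil_of_le (by omega)
    rw [pvALoop]
    simp [h, hdrop, pvF, pvG]
termination_by cycle.length - i

-- ---- B side: head of pvRun is its run value ----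
theorem pvRun_head (r : List Bool) (b : Bool) (n : Int) :
    ∃ k t, pvRun b n r = (b, k) :: t := by
  induction r generalizing b n with
  | nil => exact ⟨n, [], rfl⟩
  | cons c rest ih =>
    by_cases hc : c = b
    · simpa [pvRun, hc] using ih b (n + 1)
    · exact ⟨n, pvRun c 1 rest, by simp [pvRun, hc]⟩

-- scanning a falsy run with m elements so far equals pvG with gap m+1
theorem pvScan_run_false (r : List Bool) (m : Int) (hm : 1 ≤ m) :
    pvScan (pvRun false m r) = pvG r (m + 1) := by
  induction r generalizing m with
  | nil => simp [pvRun, pvScan, pvG]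
  | cons c rest ih =>
    cases c with
    | false => simpa [pvRun, pvG] using ih (m + 1) (by omega)
    | true =>
      obtain ⟨k, t, hk⟩ := pvRun_head rest true 1
      simp [pvRun, hk, pvScan, pvG, show m + 1 > 1 by omega]

-- scanning a truthy run equals pvG with gap 1
theorem pvScan_run_true (r : List Bool) (n : Int) :
    pvScan (pvRun true n r) = pvG r 1 := by
  induction r generalizing n with
  | nil => simp [pvRun, pvScan, pvG]
  | cons c rest ih =>
    cases c with
    | true => simpa [pvRun, pvG] using ih (n + 1)
    | false =>
      obtain ⟨k, t, hk⟩ := pvRun_head rest false 1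
      rw [pvRun, if_neg (by simp), hk]
      rw [show pvScan ((true, n) :: (false, k) :: t) = pvScan ((false, k) :: t) from by simp [pvScan]]
      rw [← hk, pvScan_run_false rest 1 (le_refl 1)]
      simp [pvG]

-- a falsy run at the start: pvRun false m r = (false, k) :: RLE of r with leading falses dropped
theorem pvRun_false_trim (r : List Bool) (m : Int) :
    ∃ k, pvRun false m r = (false, k) :: pvRLE (r.dropWhile (fun c => c = false)) := by
  induction r generalizing m with
  | nil => exact ⟨m, by simp [pvRun, pvRLE, List.dropWhile]⟩
  | cons c rest ih =>
    cases c with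
    | false => simpa [pvRun, List.dropWhile] using ih (m + 1)
    | true => exact ⟨m, by simp [pvRun, pvRLE, List.dropWhile]⟩

theorem pvF_dropWhile_false (l : List Bool) :
    pvF (l.dropWhile (fun c => c = false)) = pvF l := by
  induction l with
  | nil => rfl
  | cons c rest ih =>
    cases c with
    | false => simpa [List.dropWhile, pvF] using ih
    | true => simp [List.dropWhile]

theorem alt_eq_pvF (cycle : List Bool) : get_cycle_if_exists_alt cycle = pvF cycle := by
  cases cycle with
  | nil => rfl
  | cons b rest =>
    cases b with
    | true =>
      obtain ⟨k, t, hk⟩ := pvRun_head rest true 1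
      unfold get_cycle_if_exists_alt
      simp only [pvRLE, hk]
      rw [← hk, pvScan_run_true]
      simp [pvF]
    | false =>
      obtain ⟨k, hk⟩ := pvRun_false_trim rest 1
      unfold get_cycle_if_exists_alt
      simp only [pvRLE, hk]
      have : pvF (false :: rest) = pvF (rest.dropWhile (fun c => c = false)) := by
        simpa [pvF] using (pvF_dropWhile_false rest).symm
      rw [this]
      cases hd : rest.dropWhile (fun c => c = false) with
      | nil => simp [pvScan, pvF]
      | cons c rest' =>
        have hc : c = true := by
          have := List.head?_dropWhile_not (p := fun c => c = false) rest
          rw [hd] at this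
          simpa using this
        subst hc
        obtain ⟨k2, t2, hk2⟩ := pvRun_head rest' true 1
        simp only [hk2]
        rw [← hk2, pvScan_run_true]
        simp [pvF]

-- ===== VERDICT (by name: the statement is the Claim_ definition above) =====
theorem get_cycle_if_exists_spec : Claim_equal_get_cycle_if_exists := by
  intro cycle _
  unfold Spec_get_cycle_if_exists get_cycle_if_exists
  rw [pvALoop_eq cycle 0 (-1) (Or.inl rfl), alt_eq_pvF]
  simp
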